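-- pv_equiv track=rewrite | github.com/DanielAlejandro2605/git-galaxy | services/api/src/modules/vectorizer.py | _chunk_java_code
-- ===== SOURCE A (Python) =====
-- from typing import Dict, List, Any, Tuple
--
-- def _chunk_java_code(content: str) -> List[str]:
--     """Chunk Java code by methods, classes, and imports"""
--     chunks = []
--     lines = content.split('\n')
--     current_chunk = []
--
--     for line in lines:
--         stripped = line.strip()
--
--         # Start new chunk for imports, methods, classes
--         if (stripped.startswith('import ') or
--             stripped.startswith('public ') or
--             stripped.startswith('private ') or
--             stripped.startswith('protected ') or
--             stripped.startswith('class ') or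
--             stripped.startswith('interface ')):
--
--             if current_chunk:
--                 chunks.append('\n'.join(current_chunk))
--             current_chunk = [line]
--         else:
--             current_chunk.append(line)
--
--     if current_chunk:
--         chunks.append('\n'.join(current_chunk))
--
--     return chunks
-- ===== SOURCE B (Python) =====
-- from typing import List
--
--
-- def _is_boundary(line: str) -> bool:
--     stripped = line.strip()
--     return (stripped.startswith('import ') or
--             stripped.startswith('public ') or
--             stripped.startswith('private ') or
--             stripped.startswith('protected ') or
--             stripped.startswith('class ') or
--             stripped.startswith('interface '))
--
--
-- def _chunk_java_code(content: str) -> List[str]: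
--     """Chunk Java code by methods, classes, and imports"""
--     lines = content.split('\n')
--     bounds = [i for i, ln in enumerate(lines) if _is_boundary(ln)]
--     cuts = bounds if (bounds and bounds[0] == 0) else [0] + bounds
--     cuts2 = cuts + [len(lines)]
--     return ['\n'.join(lines[s:e]) for s, e in zip(cuts2, cuts2[1:])]
-- ===== Notes on version B (the rewrite author's own statement) =====
-- stated objective: alternative
-- what changed: B replaces A's single-pass accumulator loop by a two-pass decomposition: first collect the indices of boundary lines (import/public/private/protected/class/interface), then build each chunk by slicing between consecutive cut points and joining.
import Mathlib
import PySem

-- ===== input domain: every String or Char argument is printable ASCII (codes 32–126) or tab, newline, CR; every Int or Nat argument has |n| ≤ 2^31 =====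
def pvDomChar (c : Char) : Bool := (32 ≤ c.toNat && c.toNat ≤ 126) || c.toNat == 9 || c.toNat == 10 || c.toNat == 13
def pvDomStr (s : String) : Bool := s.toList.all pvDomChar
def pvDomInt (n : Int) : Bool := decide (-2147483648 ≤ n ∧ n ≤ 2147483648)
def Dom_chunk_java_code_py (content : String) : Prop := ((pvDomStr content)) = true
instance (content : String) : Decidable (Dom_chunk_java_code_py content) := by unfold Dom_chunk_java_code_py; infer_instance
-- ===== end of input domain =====

-- B re-implements the chunker as two passes — collect boundary line indices, then slice between
-- consecutive cut points — instead of A's single accumulator scan; objective: alternative decomposition.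

-- shared predicate: the six-way 'stripped.startswith(...)' boundary test both Pythons perform
def pvIsBoundary (line : String) : Bool :=
  let stripped := PySem.Str.strip line
  PySem.Str.startswith stripped "import " || PySem.Str.startswith stripped "public " ||
  PySem.Str.startswith stripped "private " || PySem.Str.startswith stripped "protected " ||
  PySem.Str.startswith stripped "class " || PySem.Str.startswith stripped "interface "

-- ===== PORT A =====
-- A's loop body: start a new chunk at a boundary line (flushing the current one), else extend it
def pvStepA (st : List String × List String) (line : String) : List String × List String :=
  if pvIsBoundary line then
    ((if st.2.isEmpty then st.1 else st.1 ++ [PySem.Str.join "\n" st.2]), [line])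
  else (st.1, st.2 ++ [line])

-- A's trailing 'if current_chunk: chunks.append(...)'
def pvFinA (st : List String × List String) : List String :=
  if st.2.isEmpty then st.1 else st.1 ++ [PySem.Str.join "\n" st.2]

def chunk_java_code_py (content : String) : List String :=
  let lines := (PySem.Chars.splitOn content.toList ['\n']).map String.ofList
  pvFinA (lines.foldl pvStepA ([], []))

-- ===== PORT B =====
def chunk_java_code_py_alt (content : String) : List String :=
  let lines := (PySem.Chars.splitOn content.toList ['\n']).map String.ofList
  let bounds := ((PySem.List.enumerate lines 0).filter (fun p => pvIsBoundary p.2)).map (fun p => p.1)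
  let cuts := if bounds.head? = some 0 then bounds else 0 :: bounds
  let cuts2 := cuts ++ [(lines.length : Int)]
  (cuts2.zip cuts2.tail).map (fun p => PySem.Str.join "\n" (PySem.List.slice lines (some p.1) (some p.2)))

-- ===== PRECONDITION & SPEC =====
def Spec_chunk_java_code_py (content : String) (out : List String) : Prop := out = chunk_java_code_py_alt content
instance (content : String) (out : List String) : Decidable (Spec_chunk_java_code_py content out) := by unfold Spec_chunk_java_code_py; infer_instance

-- ===== CLAIM (what is proved, stated in full; the proofs are below) =====
def Claim_equal_chunk_java_code_py : Prop := ∀ (content : String), Dom_chunk_java_code_py content → Spec_chunk_java_code_py content (chunk_java_code_py content)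

-- ===== LEMMAS AND PROOFS =====

def pvNB (l : String) : Bool := !pvIsBoundary l

-- the groups both programs produce: each group is a boundary line plus the non-boundary lines after it
def pvGrp : List String → List (List String)
  | [] => []
  | l :: tl => (l :: tl.takeWhile pvNB) :: pvGrp (tl.dropWhile pvNB)
termination_by ls => ls.length
decreasing_by simpa using Nat.lt_succ_of_le (List.length_dropWhile_le pvNB tl)

-- boundary indices, structurally
def pvBIdx : List String → List Nat
  | [] => []
  | l :: tl => if pvIsBoundary l then 0 :: (pvBIdx tl).map (· + 1) else (pvBIdx tl).map (· + 1)

-- slices of ls between consecutive cut points (last cut point = ls.length)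
def pvSliceN (ls : List String) : List Nat → List (List String)
  | [] => []
  | c :: cs => (ls.drop c).take ((cs ++ [ls.length]).headD 0 - c) :: pvSliceN ls cs

theorem pv_splitOn_go_ne_nil (sep : List Char) :
    ∀ (fuel : Nat) (l cur : List Char) (acc : List (List Char)),
      PySem.Chars.splitOn.go sep fuel l cur acc ≠ [] := by
  intro fuel
  induction fuel with
  | zero => intro l cur acc; simp [PySem.Chars.splitOn.go]
  | succ n ih =>
    intro l cur acc
    cases l with
    | nil => simp [PySem.Chars.splitOn.go]
    | cons c rest =>
      rw [PySem.Chars.splitOn.go]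
      split
      · exact ih _ _ _
      · exact ih _ _ _

theorem pv_splitOn_ne_nil (s sep : List Char) : PySem.Chars.splitOn s sep ≠ [] := by
  unfold PySem.Chars.splitOn
  exact pv_splitOn_go_ne_nil sep _ s [] []

theorem pv_finA_prefix (ls : List String) :
    ∀ (c cur : List String), pvFinA (ls.foldl pvStepA (c, cur)) = c ++ pvFinA (ls.foldl pvStepA ([], cur)) := by
  induction ls with
  | nil => intro c cur; by_cases hc : cur.isEmpty <;> simp [pvFinA, hc]
  | cons l tl ih =>
    intro c cur
    simp only [List.foldl_cons, pvStepA]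
    by_cases hb : pvIsBoundary l
    · rw [if_pos hb, if_pos hb]
      by_cases hc : cur.isEmpty
      · rw [if_pos hc, if_pos hc]
        exact ih c [l]
      · rw [if_neg hc, if_neg hc, ih (c ++ [PySem.Str.join "\n" cur]) [l], ih ([] ++ [PySem.Str.join "\n" cur]) [l]]
        simp
    · rw [if_neg hb, if_neg hb]
      rw [ih c (cur ++ [l]), ih [] (cur ++ [l])]

theorem pv_foldl_char (ls : List String) :
    ∀ (cur : List String), pvFinA (ls.foldl pvStepA ([], cur)) =
      (if (cur ++ ls.takeWhile pvNB).isEmpty then [] else [PySem.Str.join "\n" (cur ++ ls.takeWhile pvNB)]) ++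
        (pvGrp (ls.dropWhile pvNB)).map (PySem.Str.join "\n") := by
  induction ls with
  | nil =>
    intro cur
    by_cases hc : cur.isEmpty <;> simp [pvFinA, pvGrp, hc]
  | cons l tl ih =>
    intro cur
    have hstep : List.foldl pvStepA ([], cur) (l :: tl) = List.foldl pvStepA (pvStepA ([], cur) l) tl := by
      simp
    by_cases hb : pvIsBoundary l
    · have hnb : pvNB l = false := by simp [pvNB, hb]
      rw [hstep]
      simp only [pvStepA, if_pos hb]
      rw [pv_finA_prefix tl _ [l], ih [l]]
      have hgrp : pvGrp (l :: tl) = (l :: tl.takeWhile pvNB) :: pvGrp (tl.dropWhile pvNB) := by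
        rw [pvGrp]
      simp [hnb, hgrp]
    · have hnb : pvNB l = true := by simp [pvNB, hb]
      rw [hstep]
      simp only [pvStepA, if_neg hb]
      rw [ih (cur ++ [l])]
      simp [hnb]

theorem pv_enum_bidx (ls : List String) :
    ∀ (s : Int), ((PySem.List.enumerate ls s).filter (fun p => pvIsBoundary p.2)).map (fun p => p.1) =
      (pvBIdx ls).map (fun (k : Nat) => s + (k : Int)) := by
  induction ls with
  | nil => intro s; simp [PySem.List.enumerate_nil, pvBIdx]
  | cons l tl ih =>
    intro s
    rw [PySem.List.enumerate_cons, pvBIdx]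
    by_cases hb : pvIsBoundary l
    · rw [if_pos hb]
      simp only [List.filter_cons, hb, if_pos, List.map_cons, ih (s + 1)]
      simp only [List.map_map]
      congr 1
      · simp
      · apply List.map_congr_left; intro k _; simp only [Function.comp_apply]; push_cast; ring
    · rw [if_neg hb]
      simp only [List.filter_cons, hb, Bool.false_eq_true, if_false, ih (s + 1)]
      simp only [List.map_map]
      apply List.map_congr_left; intro k _; simp only [Function.comp_apply]; push_cast; ring

theorem pv_headD_map_add (cs : List Nat) (p n : Nat) :
    ((cs.map (· + p)) ++ [n + p]).headD 0 = (cs ++ [n]).headD 0 + p := by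
  cases cs <;> simp

theorem pv_zip_slice (ls : List String) (cs : List Nat) :
    (((cs.map (fun (k : Nat) => (k : Int)) ++ [(ls.length : Int)]).zip
        ((cs.map (fun (k : Nat) => (k : Int)) ++ [(ls.length : Int)]).tail)).map
      (fun p => PySem.List.slice ls (some p.1) (some p.2))) = pvSliceN ls cs := by
  induction cs with
  | nil => simp [pvSliceN]
  | cons c cs ih =>
    rw [pvSliceN]
    cases cs with
    | nil =>
      simp only [List.map_nil, List.nil_append, List.map_cons, List.cons_append, List.tail_cons]
      rw [List.zip_cons_cons]
      simp only [List.map_cons]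
      rw [PySem.List.slice_natCast]
      simp [List.zip_nil_right, pvSliceN]
    | cons c2 cs2 =>
      simp only [List.map_cons, List.cons_append, List.tail_cons] at ih ⊢
      rw [List.zip_cons_cons]
      simp only [List.map_cons]
      rw [ih, PySem.List.slice_natCast]
      simp

theorem pv_slice_shift (pre suf : List String) (cs : List Nat) :
    pvSliceN (pre ++ suf) (cs.map (· + pre.length)) = pvSliceN suf cs := by
  induction cs with
  | nil => simp [pvSliceN]
  | cons c cs ih =>
    simp only [List.map_cons]
    rw [pvSliceN, pvSliceN, ih]
    congr 1
    have hlen : (pre ++ suf).length = suf.length + pre.length := by simp; omega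
    rw [hlen, pv_headD_map_add cs pre.length suf.length, List.drop_append]
    have h1 : pre.drop (c + pre.length) = ([] : List String) := List.drop_eq_nil_of_le (by omega)
    have h2 : c + pre.length - pre.length = c := by omega
    have h3 : (cs ++ [suf.length]).headD 0 + pre.length - (c + pre.length) = (cs ++ [suf.length]).headD 0 - c := by omega
    rw [h1, h2, h3]
    simp

theorem pv_bidx_append (pre suf : List String) (h : ∀ l ∈ pre, pvNB l) :
    pvBIdx (pre ++ suf) = (pvBIdx suf).map (· + pre.length) := by
  induction pre with
  | nil => simp
  | cons x pre ih =>
    have hx : pvIsBoundary x = false := by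
      have := h x (by simp)
      simpa [pvNB] using this
    rw [List.cons_append, pvBIdx, if_neg (by simp [hx])]
    rw [ih (fun l hl => h l (by simp [hl]))]
    simp only [List.map_map]
    apply List.map_congr_left; intro k _; simp; omega

theorem pv_g2n_aux : ∀ (n : Nat) (ls : List String), ls.length ≤ n →
    (∀ l, ls.head? = some l → pvIsBoundary l) → pvSliceN ls (pvBIdx ls) = pvGrp ls := by
  intro n
  induction n with
  | zero =>
    intro ls hlen _
    have : ls = [] := List.eq_nil_of_length_eq_zero (by omega)
    subst this
    simp [pvBIdx, pvSliceN, pvGrp]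
  | succ n ih =>
    intro ls hlen hhead
    cases ls with
    | nil => simp [pvBIdx, pvSliceN, pvGrp]
    | cons l tl =>
      have hb : pvIsBoundary l := hhead l rfl
      have htw : ∀ x ∈ tl.takeWhile pvNB, pvNB x := fun x hx => List.mem_takeWhile_imp hx
      have htl : tl.takeWhile pvNB ++ tl.dropWhile pvNB = tl := List.takeWhile_append_dropWhile
      have hbidx_tl : pvBIdx tl = (pvBIdx (tl.dropWhile pvNB)).map (· + (tl.takeWhile pvNB).length) := by
        conv_lhs => rw [← htl]
        exact pv_bidx_append _ _ htw
      rw [pvGrp, pvBIdx, if_pos hb]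
      cases hdw : tl.dropWhile pvNB with
      | nil =>
        have htw2 : tl.takeWhile pvNB = tl := by
          have h0 := htl; rw [hdw] at h0; simpa using h0
        rw [hbidx_tl, hdw]
        simp only [pvBIdx, List.map_nil]
        rw [pvSliceN]
        simp [pvSliceN, pvGrp, htw2]
      | cons d dr =>
        have hd : pvIsBoundary d := by
          have := List.head?_dropWhile_not pvNB tl
          rw [hdw] at this
          simpa [pvNB] using this
        have hmap : (pvBIdx tl).map (· + 1) =
            (pvBIdx (tl.dropWhile pvNB)).map (· + (l :: tl.takeWhile pvNB).length) := by
          rw [hbidx_tl, List.map_map]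
          apply List.map_congr_left; intro k _; simp; omega
        rw [hmap, pvSliceN]
        congr 1
        · -- first slice is l :: takeWhile
          rw [hdw]
          simp only [pvBIdx, if_pos hd, List.map_cons, List.cons_append, List.headD_cons]
          have htake : List.take (tl.takeWhile pvNB).length tl = tl.takeWhile pvNB := by
            calc List.take (tl.takeWhile pvNB).length tl
                = List.take (tl.takeWhile pvNB).length (tl.takeWhile pvNB ++ tl.dropWhile pvNB) := by rw [htl]
              _ = tl.takeWhile pvNB := List.take_left
          simpa using htake
        · -- rest
          have hsplit : l :: tl = (l :: tl.takeWhile pvNB) ++ tl.dropWhile pvNB := by simp [htl]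
          rw [hsplit, pv_slice_shift, ← hdw]
          rw [hdw]
          apply ih
          · have h1 : (tl.dropWhile pvNB).length ≤ tl.length := List.length_dropWhile_le _ _
            rw [hdw] at h1
            simp only [List.length_cons] at h1 hlen ⊢
            omega
          · intro x hx
            rw [List.head?_cons] at hx
            rw [← Option.some_inj.mp hx]
            exact hd

theorem pv_g2n (ls : List String) (h : ∀ l, ls.head? = some l → pvIsBoundary l) :
    pvSliceN ls (pvBIdx ls) = pvGrp ls :=
  pv_g2n_aux ls.length ls le_rfl h

set_option maxHeartbeats 1000000 in
theorem pv_main (ls : List String) (hne : ls ≠ []) :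
    pvFinA (ls.foldl pvStepA ([], [])) =
      (let bounds := ((PySem.List.enumerate ls 0).filter (fun p => pvIsBoundary p.2)).map (fun p => p.1)
       let cuts := if bounds.head? = some 0 then bounds else 0 :: bounds
       let cuts2 := cuts ++ [(ls.length : Int)]
       (cuts2.zip cuts2.tail).map (fun p => PySem.Str.join "\n" (PySem.List.slice ls (some p.1) (some p.2)))) := by
  obtain ⟨l, tl, rfl⟩ : ∃ l tl, ls = l :: tl := by
    cases ls with
    | nil => exact absurd rfl hne
    | cons a b => exact ⟨a, b, rfl⟩
  have hA := pv_foldl_char (l :: tl) []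
  simp only [List.nil_append] at hA
  have hbounds : ((PySem.List.enumerate (l :: tl) 0).filter (fun p => pvIsBoundary p.2)).map (fun p => p.1)
      = (pvBIdx (l :: tl)).map (fun (k : Nat) => (k : Int)) := by
    rw [pv_enum_bidx (l :: tl) 0]
    apply List.map_congr_left; intro k _; simp
  have hmapjn : ∀ (cs : List Nat),
      (((cs.map (fun (k : Nat) => (k : Int)) ++ [((l :: tl).length : Int)]).zip
          ((cs.map (fun (k : Nat) => (k : Int)) ++ [((l :: tl).length : Int)]).tail)).map
        (fun p => PySem.Str.join "\n" (PySem.List.slice (l :: tl) (some p.1) (some p.2)))) =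
        (pvSliceN (l :: tl) cs).map (PySem.Str.join "\n") := by
    intro cs
    rw [← pv_zip_slice (l :: tl) cs, List.map_map]
    rfl
  simp only []
  rw [hbounds, hA]
  by_cases hb : pvIsBoundary l
  · -- first line is a boundary: no leading chunk
    have hbidx : pvBIdx (l :: tl) = 0 :: (pvBIdx tl).map (· + 1) := by rw [pvBIdx, if_pos hb]
    have hcond : ((pvBIdx (l :: tl)).map (fun (k : Nat) => (k : Int))).head? = some 0 := by
      rw [hbidx]; simp
    have htke : (l :: tl).takeWhile pvNB = [] := by
      simp [pvNB, hb]
    have hdrop : (l :: tl).dropWhile pvNB = l :: tl := by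
      simp [pvNB, hb]
    simp only [hcond, if_pos]
    rw [hmapjn (pvBIdx (l :: tl)), pv_g2n (l :: tl) (fun x hx => by
      rw [List.head?_cons] at hx
      rw [← Option.some_inj.mp hx]
      exact hb)]
    rw [htke, hdrop]
    simp
  · -- first line is not a boundary: a leading chunk is emitted
    have hnb : pvNB l = true := by simp [pvNB, hb]
    have htl : (l :: tl).takeWhile pvNB ++ (l :: tl).dropWhile pvNB = l :: tl :=
      List.takeWhile_append_dropWhile
    have htw : ∀ x ∈ (l :: tl).takeWhile pvNB, pvNB x := fun x hx => List.mem_takeWhile_imp hx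
    have hbidx : pvBIdx (l :: tl) =
        (pvBIdx ((l :: tl).dropWhile pvNB)).map (· + ((l :: tl).takeWhile pvNB).length) := by
      conv_lhs => rw [← htl]
      exact pv_bidx_append _ _ htw
    have htke : (l :: tl).takeWhile pvNB = l :: tl.takeWhile pvNB := by
      simp [hnb]
    have hcond : ¬ (((pvBIdx (l :: tl)).map (fun (k : Nat) => (k : Int))).head? = some 0) := by
      rw [pvBIdx, if_neg hb]
      cases h0 : pvBIdx tl with
      | nil => simp
      | cons a r => simp; omega
    rw [if_neg hcond]
    have hz : (0 : Int) :: (pvBIdx (l :: tl)).map (fun (k : Nat) => (k : Int)) =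
        (0 :: pvBIdx (l :: tl)).map (fun (k : Nat) => (k : Int)) := by simp
    rw [hz, hmapjn (0 :: pvBIdx (l :: tl)), pvSliceN]
    have hife : (((l :: tl).takeWhile pvNB).isEmpty = true) = False := by
      rw [htke]; simp
    cases hdw : (l :: tl).dropWhile pvNB with
    | nil =>
      have htw2 : (l :: tl).takeWhile pvNB = l :: tl := by
        have h0 := htl; rw [hdw] at h0; simpa using h0
      rw [hbidx, hdw]
      simp only [pvBIdx, List.map_nil, List.nil_append, List.headD_cons, List.drop_zero,
        Nat.sub_zero, hife, pvGrp]
      rw [pvSliceN]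
      simp [htw2]
    | cons d dr =>
      have hd : pvIsBoundary d := by
        have h0 := List.head?_dropWhile_not pvNB (l :: tl)
        rw [hdw] at h0
        simpa [pvNB] using h0
      have hbd : pvBIdx ((l :: tl).dropWhile pvNB) = 0 :: (pvBIdx dr).map (· + 1) := by
        rw [hdw, pvBIdx, if_pos hd]
      have hheadD : ((pvBIdx (l :: tl)) ++ [(l :: tl).length]).headD 0 =
          ((l :: tl).takeWhile pvNB).length := by
        rw [hbidx, hbd]; simp
      have htake : (l :: tl).take ((l :: tl).takeWhile pvNB).length = (l :: tl).takeWhile pvNB := by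
        calc (l :: tl).take ((l :: tl).takeWhile pvNB).length
            = ((l :: tl).takeWhile pvNB ++ (l :: tl).dropWhile pvNB).take
                ((l :: tl).takeWhile pvNB).length := by rw [htl]
          _ = (l :: tl).takeWhile pvNB := List.take_left
      have hrest : pvSliceN (l :: tl) (pvBIdx (l :: tl)) = pvGrp ((l :: tl).dropWhile pvNB) := by
        conv_lhs => rw [← htl]
        rw [pv_bidx_append _ _ htw, pv_slice_shift]
        exact pv_g2n _ (fun x hx => by
          rw [hdw, List.head?_cons] at hx
          rw [← Option.some_inj.mp hx]
          exact hd)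
      simp only [List.drop_zero, Nat.sub_zero, hheadD, htake, hrest, List.map_cons, hife,
        if_false]
      simp
      rw [hdw]

-- ===== VERDICT (by name: the statement is the Claim_ definition above) =====
theorem chunk_java_code_py_spec : Claim_equal_chunk_java_code_py := by
  intro content _
  unfold Spec_chunk_java_code_py chunk_java_code_py chunk_java_code_py_alt
  apply pv_main
  simp only [ne_eq, List.map_eq_nil_iff]
  exact pv_splitOn_ne_nil content.toList ['\n']
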